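-- pv_equiv track=rewrite | github.com/elsid/master | src/match_uml/uml_matcher/match.py | eq_ignore_order
-- ===== SOURCE A (Python) =====
-- def eq_ignore_order(first, second):
--
--     def is_list(value):
--         return isinstance(value, list)
--
--     used = set()
--     if len(first) != len(second):
--         return False
--     for x in first:
--         found_eq = False
--
--         def can_be_used(i, y):
--             return (i not in used and (is_list(y) and eq_ignore_order(x, y) or
--                     not is_list(y) and x == y))
--
--         for i, y in enumerate(second):
--             if can_be_used(i, y):
--                 used.add(i)
--                 found_eq = True
--                 break
--         if not found_eq:
--             return False
--     return True
-- ===== SOURCE B (Python) =====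
-- def eq_ignore_order(first, second):
--     # Canonicalize (recursively sort nested lists), then compare canonical forms:
--     # two lists are equal ignoring order iff their sorted canonical forms coincide.
--     def canon(value):
--         if isinstance(value, list):
--             return sorted(canon(v) for v in value)
--         return value
--     return canon(first) == canon(second)
-- ===== Notes on version B (the rewrite author's own statement) =====
-- stated objective: faster
-- what changed: replaces A's quadratic greedy matching (for each element, linear scan of the other list over an index 'used' set) by canonicalize-then-compare: sort both lists and compare for equality
import Mathlib
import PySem

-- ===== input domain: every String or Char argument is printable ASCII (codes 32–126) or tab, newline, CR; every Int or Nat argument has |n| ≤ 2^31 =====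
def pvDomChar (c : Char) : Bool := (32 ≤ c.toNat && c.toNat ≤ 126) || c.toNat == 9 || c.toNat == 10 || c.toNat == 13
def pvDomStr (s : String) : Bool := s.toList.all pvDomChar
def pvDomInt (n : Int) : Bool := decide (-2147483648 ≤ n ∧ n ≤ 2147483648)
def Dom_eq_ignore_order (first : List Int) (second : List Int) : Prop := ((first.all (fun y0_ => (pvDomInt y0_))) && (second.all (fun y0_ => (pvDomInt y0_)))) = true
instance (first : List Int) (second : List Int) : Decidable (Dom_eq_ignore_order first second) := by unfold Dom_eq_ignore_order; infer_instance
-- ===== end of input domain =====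

-- B replaces A's quadratic greedy matching over a 'used' index set by canonicalize-then-compare (sort both lists, compare).

-- ===== PORT A =====
-- can_be_used(i, y): elements are Int here, so is_list(y) is always False; the
-- 'is_list(y) and eq_ignore_order(x, y)' branch is dead and the condition is
-- 'i not in used and (not is_list(y) and x == y)'.
def pvCanBeUsed (used : PySem.Set Int) (x : Int) (i : Int) (y : Int) : Bool :=
  !(PySem.Set.contains used i) && (x == y)

-- inner loop: 'for i, y in enumerate(second): if can_be_used(i, y): used.add(i); found_eq = True; break'
def pvFindUse (x : Int) (used : PySem.Set Int) : List (Int × Int) → Option Int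
  | [] => none
  | (i, y) :: rest => if pvCanBeUsed used x i y then some i else pvFindUse x used rest

-- outer 'for x in first' loop carrying the mutable 'used' set; 'if not found_eq: return False'
def pvLoopA (second : List Int) : List Int → PySem.Set Int → Bool
  | [], _ => true
  | x :: xs, used =>
    match pvFindUse x used (PySem.List.enumerate second 0) with
    | some i => pvLoopA second xs (PySem.Set.add used i)
    | none => false

def eq_ignore_order (first : List Int) (second : List Int) : Bool :=
  if first.length ≠ second.length then false
  else pvLoopA second first PySem.Set.empty

-- ===== PORT B =====
-- Source B: canon(first) == canon(second); on flat Int lists canon(v) = sorted(v).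
def eq_ignore_order_alt (first : List Int) (second : List Int) : Bool :=
  PySem.List.sorted first (fun x => x) false == PySem.List.sorted second (fun x => x) false

-- ===== PRECONDITION & SPEC =====
def Spec_eq_ignore_order (first : List Int) (second : List Int) (out : Bool) : Prop := out = eq_ignore_order_alt first second
instance (first : List Int) (second : List Int) (out : Bool) : Decidable (Spec_eq_ignore_order first second out) := by unfold Spec_eq_ignore_order; infer_instance

-- ===== CLAIM (what is proved, stated in full; the proofs are below) =====
def Claim_equal_eq_ignore_order : Prop := ∀ (first : List Int) (second : List Int), Dom_eq_ignore_order first second → Spec_eq_ignore_order first second (eq_ignore_order first second)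

-- ===== LEMMAS AND PROOFS =====

-- the values of l at indices not yet in 'used'
def pvAvail (used : PySem.Set Int) (l : List (Int × Int)) : List Int :=
  (l.filter (fun p => !(PySem.Set.contains used p.1))).map (·.2)

theorem pvCanBeUsed_iff {used : PySem.Set Int} {x i y : Int} :
    pvCanBeUsed used x i y = true ↔ i ∉ used ∧ x = y := by
  simp [pvCanBeUsed]

theorem pvAvail_cons_mem {used : PySem.Set Int} {i y : Int} {rest : List (Int × Int)}
    (hu : i ∈ used) : pvAvail used ((i, y) :: rest) = pvAvail used rest := by
  simp [pvAvail, hu]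

theorem pvAvail_cons_not_mem {used : PySem.Set Int} {i y : Int} {rest : List (Int × Int)}
    (hu : i ∉ used) : pvAvail used ((i, y) :: rest) = y :: pvAvail used rest := by
  simp [pvAvail, hu]

theorem pvFindUse_none {x : Int} {used : PySem.Set Int} {l : List (Int × Int)} :
    pvFindUse x used l = none ↔ x ∉ pvAvail used l := by
  induction l with
  | nil => simp [pvFindUse, pvAvail]
  | cons p rest ih =>
    obtain ⟨i, y⟩ := p
    by_cases hu : i ∈ used
    · have hc : pvCanBeUsed used x i y = false := by
        rw [Bool.eq_false_iff, ne_eq, pvCanBeUsed_iff]; tauto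
      rw [pvFindUse, hc, if_neg (by simp), ih, pvAvail_cons_mem hu]
    · by_cases hxy : x = y
      · have hc : pvCanBeUsed used x i y = true := pvCanBeUsed_iff.2 ⟨hu, hxy⟩
        rw [pvFindUse, hc, if_pos rfl, pvAvail_cons_not_mem hu]
        simp [hxy]
      · have hc : pvCanBeUsed used x i y = false := by
          rw [Bool.eq_false_iff, ne_eq, pvCanBeUsed_iff]; tauto
        rw [pvFindUse, hc, if_neg (by simp), ih, pvAvail_cons_not_mem hu]
        simp [hxy]

theorem pvFindUse_some {x : Int} {used : PySem.Set Int} {l : List (Int × Int)} {i : Int}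
    (h : pvFindUse x used l = some i) :
    i ∉ used ∧ (i, x) ∈ l := by
  induction l with
  | nil => simp [pvFindUse] at h
  | cons p rest ih =>
    obtain ⟨j, y⟩ := p
    by_cases hc : pvCanBeUsed used x j y = true
    · rw [pvFindUse, hc, if_pos rfl, Option.some.injEq] at h
      subst h
      obtain ⟨h1, h2⟩ := pvCanBeUsed_iff.1 hc
      exact ⟨h1, by simp [← h2]⟩
    · rw [pvFindUse, if_neg hc] at h
      obtain ⟨h1, h2⟩ := ih h
      exact ⟨h1, List.mem_cons_of_mem _ h2⟩

theorem pvAvail_add_not_mem {used : PySem.Set Int} {j : Int} {l : List (Int × Int)}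
    (h : ∀ p ∈ l, p.1 ≠ j) : pvAvail (PySem.Set.add used j) l = pvAvail used l := by
  induction l with
  | nil => rfl
  | cons p rest ih =>
    obtain ⟨i, y⟩ := p
    have hij : i ≠ j := h (i, y) (List.mem_cons_self ..)
    have hrest : ∀ q ∈ rest, q.1 ≠ j := fun q hq => h q (List.mem_cons_of_mem _ hq)
    by_cases hu : i ∈ used
    · rw [pvAvail_cons_mem hu, pvAvail_cons_mem (by rw [PySem.Set.mem_add]; left; exact hu),
        ih hrest]
    · rw [pvAvail_cons_not_mem hu,
        pvAvail_cons_not_mem (by rw [PySem.Set.mem_add]; rintro (h1 | h2); exact hu h1; exact hij h2),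
        ih hrest]

theorem pvAvail_add_found {x : Int} {used : PySem.Set Int} {l : List (Int × Int)} {i : Int}
    (hnd : (l.map Prod.fst).Nodup) (h : pvFindUse x used l = some i) :
    pvAvail (PySem.Set.add used i) l = (pvAvail used l).erase x := by
  induction l with
  | nil => simp [pvFindUse] at h
  | cons p rest ih =>
    obtain ⟨j, y⟩ := p
    simp only [List.map_cons, List.nodup_cons] at hnd
    by_cases hc : pvCanBeUsed used x j y = true
    · rw [pvFindUse, hc, if_pos rfl, Option.some.injEq] at h
      subst h
      obtain ⟨h1, h2⟩ := pvCanBeUsed_iff.1 hc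
      rw [pvAvail_cons_mem (by rw [PySem.Set.mem_add]; right; rfl),
        pvAvail_cons_not_mem h1,
        pvAvail_add_not_mem (fun q hq he => hnd.1 (by rw [← he]; exact List.mem_map_of_mem (f := Prod.fst) hq)),
        h2, List.erase_cons_head]
    · rw [pvFindUse, if_neg hc] at h
      obtain ⟨hi1, hi2⟩ := pvFindUse_some h
      have hij : i ≠ j := fun he => hnd.1 (by rw [← he]; exact List.mem_map_of_mem (f := Prod.fst) hi2)
      have hx_ne : ¬(j ∉ used ∧ x = y) := fun hh => hc (pvCanBeUsed_iff.2 hh)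
      by_cases hu : j ∈ used
      · rw [pvAvail_cons_mem hu, pvAvail_cons_mem (by rw [PySem.Set.mem_add]; left; exact hu),
          ih hnd.2 h]
      · have hxy : x ≠ y := fun he => hx_ne ⟨hu, he⟩
        rw [pvAvail_cons_not_mem hu,
          pvAvail_cons_not_mem (by rw [PySem.Set.mem_add]; rintro (h1 | h2); exact hu h1; exact hij h2.symm),
          ih hnd.2 h, List.erase_cons_tail (by simpa using fun he => hxy he.symm)]

-- A's loop succeeds iff the remaining 'first' elements form a sub-multiset of the unused values of 'second'
theorem pvLoopA_iff (second : List Int) (first : List Int) (used : PySem.Set Int) :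
    pvLoopA second first used = true ↔
      first.Subperm (pvAvail used (PySem.List.enumerate second 0)) := by
  induction first generalizing used with
  | nil => simp [pvLoopA]
  | cons x xs ih =>
    have hnd : ((PySem.List.enumerate second 0).map Prod.fst).Nodup := by
      have hp := PySem.List.pairwise_lt_enumerate (xs := second) (s := 0)
      rw [List.nodup_iff_pairwise_ne, List.pairwise_map]
      exact hp.imp (fun h => ne_of_lt h)
    cases hf : pvFindUse x used (PySem.List.enumerate second 0) with
    | none =>
      have hx : x ∉ pvAvail used (PySem.List.enumerate second 0) := pvFindUse_none.1 hf
      rw [pvLoopA, hf]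
      constructor
      · intro h; cases h
      · intro h; exact absurd (h.subset (List.mem_cons_self ..)) hx
    | some i =>
      obtain ⟨hi1, hi2⟩ := pvFindUse_some hf
      have hx : x ∈ pvAvail used (PySem.List.enumerate second 0) := by
        refine List.mem_map.2 ⟨(i, x), List.mem_filter.2 ⟨hi2, ?_⟩, rfl⟩
        simp [hi1]
      rw [pvLoopA, hf, ih, pvAvail_add_found hnd hf]
      constructor
      · intro h
        exact ((List.subperm_cons x).2 h).trans (List.perm_cons_erase hx).symm.subperm
      · intro h
        simpa [List.erase_cons_head] using h.erase x

theorem pvAvail_empty (second : List Int) :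
    pvAvail PySem.Set.empty (PySem.List.enumerate second 0) = second := by
  simp only [pvAvail]
  rw [List.filter_eq_self.2 (by intro p _; simp [PySem.Set.empty])]
  exact PySem.List.map_snd_enumerate ..

-- ===== VERDICT (by name: the statement is the Claim_ definition above) =====
theorem eq_ignore_order_spec : Claim_equal_eq_ignore_order := by
  intro first second _
  unfold Spec_eq_ignore_order eq_ignore_order eq_ignore_order_alt
  by_cases hl : first.length = second.length
  · rw [if_neg (by simp [hl])]
    rw [Bool.eq_iff_iff, pvLoopA_iff, pvAvail_empty, beq_iff_eq,
      PySem.List.sorted_id_eq_sorted_id_iff_perm]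
    constructor
    · intro h; exact h.perm_of_length_le (le_of_eq hl.symm)
    · intro h; exact h.subperm
  · rw [if_pos (by simpa using hl), eq_comm, Bool.eq_false_iff, ne_eq, beq_iff_eq,
      PySem.List.sorted_id_eq_sorted_id_iff_perm]
    intro h; exact hl h.length_eq
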